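-- pv_equiv track=rewrite | github.com/flutter/flutter | sky/engine/build/scripts/media_feature_symbol.py | mediaFeatureSymbol
-- ===== SOURCE A (Python) =====
-- def mediaFeatureSymbol(entry, suffix):
--     name = entry['name']
--     if name.startswith('-webkit-'):
--         name = name[8:]
--
--     foundDash = False
--     newName = ""
--     for chr in name:
--         if chr == '-':
--             foundDash = True
--             continue
--         if foundDash:
--             chr = chr.upper()
--             foundDash = False
--         newName = newName + chr
--     newName = newName + suffix
--     return newName
-- ===== SOURCE B (Python) =====
-- def mediaFeatureSymbol(entry, suffix):
--     name = entry['name']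
--     if name.startswith('-webkit-'):
--         name = name[8:]
--     parts = name.split('-')
--     return parts[0] + ''.join(p[:1].upper() + p[1:] for p in parts[1:]) + suffix
-- ===== Notes on version B (the rewrite author's own statement) =====
-- stated objective: idiomatic
-- what changed: Replaces the per-character loop with its foundDash flag by a split('-') into segments followed by uppercasing the first character of every segment after the first and joining; segments are capitalised with p[:1].upper()+p[1:] so empty segments and non-letter heads behave exactly as A.
-- outside the precondition, e.g. on mediaFeatureSymbol({}, ''): A raises KeyError, B raises KeyError
import Mathlib
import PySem

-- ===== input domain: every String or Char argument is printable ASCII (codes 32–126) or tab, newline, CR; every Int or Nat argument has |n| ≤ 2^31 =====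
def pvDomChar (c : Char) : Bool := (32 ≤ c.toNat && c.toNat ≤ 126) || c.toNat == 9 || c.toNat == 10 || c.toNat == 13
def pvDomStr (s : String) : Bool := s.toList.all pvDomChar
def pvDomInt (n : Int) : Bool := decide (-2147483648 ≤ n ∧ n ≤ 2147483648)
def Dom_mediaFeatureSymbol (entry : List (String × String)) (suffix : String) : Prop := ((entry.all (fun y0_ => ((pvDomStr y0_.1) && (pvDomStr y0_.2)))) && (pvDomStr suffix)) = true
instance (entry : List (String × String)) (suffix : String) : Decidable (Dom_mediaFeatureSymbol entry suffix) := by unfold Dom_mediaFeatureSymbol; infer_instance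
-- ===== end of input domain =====

-- B replaces A's per-character loop (foundDash flag, char-by-char concatenation) by a
-- split-on-'-' tokenisation followed by uppercasing the head of every segment after the
-- first and joining; identical return value on every input where A returns (Pre_).

-- ===== PORT A =====
-- A's for-loop over the characters, carried as a recursion with the same state
-- (foundDash flag, newName accumulator); exact transliteration of the loop body.
def mfsLoopA : Bool → List Char → List Char → List Char
  | _, acc, [] => acc
  | f, acc, c :: rest =>
    if c = '-' then mfsLoopA true acc rest
    else if f then mfsLoopA false (acc ++ [PySem.Chars.upperChar c]) rest
    else mfsLoopA false (acc ++ [c]) rest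

def mediaFeatureSymbol (entry : List (String × String)) (suffix : String) : String :=
  match (PySem.Dict.ofList entry).get? "name" with
  | none => ""   -- unreachable under Pre_ (Python raises KeyError here)
  | some name0 =>
    let name : List Char :=
      if PySem.Str.startswith name0 "-webkit-" then PySem.Chars.slice name0.toList (some 8) none
      else name0.toList
    String.ofList (mfsLoopA false [] name ++ suffix.toList)

-- ===== PORT B =====
-- p[:1].upper() + p[1:]
def mfsCap (p : List Char) : List Char :=
  match p with
  | [] => []
  | c :: r => PySem.Chars.upperChar c :: r

def mediaFeatureSymbol_alt (entry : List (String × String)) (suffix : String) : String :=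
  match (PySem.Dict.ofList entry).get? "name" with
  | none => ""   -- unreachable under Pre_ (Python raises KeyError here)
  | some name0 =>
    let name : List Char :=
      if PySem.Str.startswith name0 "-webkit-" then PySem.Chars.slice name0.toList (some 8) none
      else name0.toList
    match List.splitOn '-' name with
    | [] => String.ofList suffix.toList   -- unreachable: splitOn never returns []
    | p :: ps => String.ofList (p ++ (ps.map mfsCap).flatten ++ suffix.toList)

-- ===== PRECONDITION & SPEC =====
-- Pre_ excludes exactly the inputs where entry has no key 'name': Python A raises KeyError there.
def Pre_mediaFeatureSymbol (entry : List (String × String)) (suffix : String) : Prop :=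
  (PySem.Dict.ofList entry).contains "name" = true
instance (entry : List (String × String)) (suffix : String) : Decidable (Pre_mediaFeatureSymbol entry suffix) := by unfold Pre_mediaFeatureSymbol; infer_instance

def pvWitness_mediaFeatureSymbol : (List (String × String)) × String :=
  ([("name", "-webkit-max-device-width")], "MediaFeature")

def Spec_mediaFeatureSymbol (entry : List (String × String)) (suffix : String) (out : String) : Prop := out = mediaFeatureSymbol_alt entry suffix
instance (entry : List (String × String)) (suffix : String) (out : String) : Decidable (Spec_mediaFeatureSymbol entry suffix out) := by unfold Spec_mediaFeatureSymbol; infer_instance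

-- ===== CLAIM (what is proved, stated in full; the proofs are below) =====
def Claim_equal_mediaFeatureSymbol : Prop := ∀ (entry : List (String × String)) (suffix : String), Dom_mediaFeatureSymbol entry suffix → Pre_mediaFeatureSymbol entry suffix → Spec_mediaFeatureSymbol entry suffix (mediaFeatureSymbol entry suffix)

-- ===== LEMMAS AND PROOFS =====

-- A's loop only appends to its accumulator.
theorem mfsLoopA_acc (cs : List Char) : ∀ (f : Bool) (acc : List Char),
    mfsLoopA f acc cs = acc ++ mfsLoopA f [] cs := by
  induction cs with
  | nil => intro f acc; simp [mfsLoopA]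
  | cons c rest ih =>
    intro f acc
    by_cases hc : c = '-'
    · simp only [mfsLoopA, hc, if_pos]
      exact ih true acc
    · cases f
      · simp only [mfsLoopA, hc, if_false, Bool.false_eq_true, List.nil_append]
        rw [ih false (acc ++ [c]), ih false [c], List.append_assoc]
      · simp only [mfsLoopA, hc, if_true, if_false, List.nil_append]
        rw [ih false (acc ++ [PySem.Chars.upperChar c]), ih false [PySem.Chars.upperChar c],
          List.append_assoc]

-- The loop from either flag state equals B's split-and-capitalise of the same characters.
theorem mfsLoopA_splitOn (cs : List Char) :
    (mfsLoopA false [] cs =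
      (match List.splitOnP (fun x => x == '-') cs with
       | [] => []
       | p :: ps => p ++ (ps.map mfsCap).flatten)) ∧
    mfsLoopA true [] cs = ((List.splitOnP (fun x => x == '-') cs).map mfsCap).flatten := by
  induction cs with
  | nil => simp [mfsLoopA, List.splitOnP_nil, mfsCap]
  | cons c rest ih =>
    obtain ⟨ihf, iht⟩ := ih
    by_cases hc : c = '-'
    · constructor <;>
        simp [mfsLoopA, hc, List.splitOnP_cons, iht, mfsCap]
    · obtain ⟨p, ps, hps⟩ : ∃ p ps, List.splitOnP (fun x => x == '-') rest = p :: ps := by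
        cases h : List.splitOnP (fun x => x == '-') rest with
        | nil => exact absurd h (List.splitOnP_ne_nil _ _)
        | cons p ps => exact ⟨p, ps, rfl⟩
      constructor
      · rw [show mfsLoopA false [] (c :: rest) = mfsLoopA false [c] rest by
          simp [mfsLoopA, hc]]
        rw [mfsLoopA_acc, ihf]
        simp [List.splitOnP_cons, hc, hps]
      · rw [show mfsLoopA true [] (c :: rest) =
              mfsLoopA false [PySem.Chars.upperChar c] rest by simp [mfsLoopA, hc]]
        rw [mfsLoopA_acc, ihf]
        simp [List.splitOnP_cons, hc, hps, mfsCap]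

-- ===== VERDICT (by name: the statement is the Claim_ definition above) =====
theorem mediaFeatureSymbol_spec : Claim_equal_mediaFeatureSymbol := by
  intro entry suffix _ hpre
  unfold Spec_mediaFeatureSymbol mediaFeatureSymbol mediaFeatureSymbol_alt
  cases h : (PySem.Dict.ofList entry).get? "name" with
  | none =>
    rw [Pre_mediaFeatureSymbol, PySem.Dict.contains_eq_isSome_get?, h] at hpre
  | some name0 =>
    simp only []
    set name : List Char :=
      if PySem.Str.startswith name0 "-webkit-" then PySem.Chars.slice name0.toList (some 8) none
      else name0.toList with hname
    have hmain := (mfsLoopA_splitOn name).1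
    have hsp : List.splitOn '-' name = List.splitOnP (fun x => x == '-') name := rfl
    cases hps : List.splitOnP (fun x => x == '-') name with
    | nil => exact absurd hps (List.splitOnP_ne_nil _ _)
    | cons p ps =>
      rw [hmain, hps]
      simp [hsp, hps]
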